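-- pv_equiv track=rewrite | github.com/nottoBD/python-ExcelParsing-automation | ChannelSynthesizer/src/parsers/parse_all_text.py | modify_row
-- ===== SOURCE A (Python) =====
-- VOO_info_codes = {
--     "VS": "VOOsport",
--     "w VS": "VOOsport World",
--     "Pa": "Bouquet Panorama",
--     "Ci": "Option Ciné Pass",
--     "Doc": "Be Bouquet Documentaires",
--     "Div": "Be Bouquet Divertissement",
--     "Co": "Be Cool",
--     "Enf": "Be Bouquet Enfant",
--     "Sp": "Be Bouquet Sport",
--     "Sel": "Be Bouquet Selection",
--     "Inf": "Option Infos",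
--     "Sen": "Option Sensation",
--     "Ch": "Option Charme",
--     "FF": "Family Fun",
--     "DM": "Discover More",
--     "CX": "Classé X",
--     "MX": "Man-X",
--     "B": "Bruxelles",
--     "G": "Comm. German",
--     "W": "Wallonie",
-- }
--
-- def is_section_name_in_row(words, section_names):
--     section_indices = []
--     section_lengths = {name: len(name.split()) for name in section_names}
--
--     for i in range(len(words)):
--         for section in section_names:
--             section_words = section.split()
--             if words[i:i + len(section_words)] == section_words:
--                 section_indices.append((i, i + len(section_words) - 1))
--     return section_indices
--
-- def modify_row(row, section_names):
--     words = row.split()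
--     last_valid_index = -1
--
--     section_indices = is_section_name_in_row(words, section_names)
--
--     for i, word in enumerate(words):
--         if word in VOO_info_codes:
--             last_valid_index = i
--             if i + 1 < len(words):
--                 next_word = words[i + 1]
--                 if next_word not in VOO_info_codes and next_word not in VOO_info_codes.values():
--                     break
--
--     if last_valid_index != -1:
--         if section_indices:
--             first_section_index = min(section_indices, key=lambda x: x[0])[0]
--             return " ".join(words[:last_valid_index + 1] + words[first_section_index:])
--         else:
--             return " ".join(words[:last_valid_index + 1])
--     else:
--         return row
-- ===== SOURCE B (Python) =====
-- VOO_info_codes = {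
--     "VS": "VOOsport",
--     "w VS": "VOOsport World",
--     "Pa": "Bouquet Panorama",
--     "Ci": "Option Ciné Pass",
--     "Doc": "Be Bouquet Documentaires",
--     "Div": "Be Bouquet Divertissement",
--     "Co": "Be Cool",
--     "Enf": "Be Bouquet Enfant",
--     "Sp": "Be Bouquet Sport",
--     "Sel": "Be Bouquet Selection",
--     "Inf": "Option Infos",
--     "Sen": "Option Sensation",
--     "Ch": "Option Charme",
--     "FF": "Family Fun",
--     "DM": "Discover More",
--     "CX": "Classé X",
--     "MX": "Man-X",
--     "B": "Bruxelles",
--     "G": "Comm. German",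
--     "W": "Wallonie",
-- }
--
--
-- def modify_row(row, section_names):
--     # single fused pass: tracks the frozen-on-break code cutoff and the first
--     # section-match position together, exiting as soon as both are settled
--     words = row.split()
--     n = len(words)
--     patterns = [s.split() for s in section_names]
--     last_valid = -1
--     stopped = False
--     first_section = None
--     for i in range(n):
--         if first_section is None and any(words[i:i + len(p)] == p for p in patterns):
--             first_section = i
--         if not stopped and words[i] in VOO_info_codes:
--             last_valid = i
--             if i + 1 < n and words[i + 1] not in VOO_info_codes and words[i + 1] not in VOO_info_codes.values():
--                 stopped = True
--         if stopped and first_section is not None: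
--             break
--     if last_valid == -1:
--         return row
--     head = words[:last_valid + 1]
--     if first_section is None:
--         return " ".join(head)
--     return " ".join(head + words[first_section:])
-- ===== Notes on version B (the rewrite author's own statement) =====
-- stated objective: alternative
-- what changed: B fuses A's two staged passes (build the full list of (start,end) section matches then take the min; separate break-loop over info codes) into one single scan that carries the state (last_valid, stopped, first_section) together, pre-splits the section names once, and breaks out as soon as both the code cutoff and the first section position are settled.
import Mathlib
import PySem

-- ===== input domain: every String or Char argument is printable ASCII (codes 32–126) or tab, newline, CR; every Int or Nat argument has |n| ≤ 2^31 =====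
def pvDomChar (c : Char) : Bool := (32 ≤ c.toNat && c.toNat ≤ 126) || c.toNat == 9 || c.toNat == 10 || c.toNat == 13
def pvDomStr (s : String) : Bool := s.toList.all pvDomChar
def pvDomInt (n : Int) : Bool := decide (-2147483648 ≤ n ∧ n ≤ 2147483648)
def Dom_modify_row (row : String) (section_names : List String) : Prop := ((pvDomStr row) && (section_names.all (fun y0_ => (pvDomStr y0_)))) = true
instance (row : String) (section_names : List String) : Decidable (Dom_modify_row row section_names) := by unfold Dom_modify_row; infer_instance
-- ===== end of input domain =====

-- B replaces A's staged passes (collect all section matches, take the min; separate break-loop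
-- over info codes) by ONE fused scan that tracks both results together and exits early (objective: alternative).

-- ===== PORT A =====
-- the module constant VOO_info_codes (shared by both Pythons)
def vooDict : PySem.Dict String String := PySem.Dict.ofList
  [("VS", "VOOsport"), ("w VS", "VOOsport World"), ("Pa", "Bouquet Panorama"),
   ("Ci", "Option Ciné Pass"), ("Doc", "Be Bouquet Documentaires"),
   ("Div", "Be Bouquet Divertissement"), ("Co", "Be Cool"), ("Enf", "Be Bouquet Enfant"),
   ("Sp", "Be Bouquet Sport"), ("Sel", "Be Bouquet Selection"), ("Inf", "Option Infos"),
   ("Sen", "Option Sensation"), ("Ch", "Option Charme"), ("FF", "Family Fun"),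
   ("DM", "Discover More"), ("CX", "Classé X"), ("MX", "Man-X"), ("B", "Bruxelles"),
   ("G", "Comm. German"), ("W", "Wallonie")]

-- 'words[i:i + len(section_words)] == section_words' (A's slice comparison)
def secMatch (words : List String) (i : Int) (s : String) : Bool :=
  decide (PySem.List.slice words (some i) (some (i + ((PySem.Str.split₀ s).length : Int))) = PySem.Str.split₀ s)

def is_section_name_in_row (words : List String) (section_names : List String) : List (Int × Int) :=
  (PySem.List.pyRange 0 (words.length : Int) 1).foldl (fun acc i =>
    section_names.foldl (fun acc2 sec =>
      if secMatch words i sec then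
        acc2 ++ [(i, i + ((PySem.Str.split₀ sec).length : Int) - 1)]
      else acc2) acc) []

-- A's 'for i, word in enumerate(words): …' loop with its break, as index recursion
def modifyRowLoop (words : List String) (i : Nat) (last_valid_index : Int) : Int :=
  if h : i < words.length then
    let word := words[i]
    if vooDict.contains word then
      let lvi' : Int := (i : Int)
      if h2 : i + 1 < words.length then
        let next_word := words[i + 1]
        if !(vooDict.contains next_word) && !((vooDict.values).contains next_word) then lvi'
        else modifyRowLoop words (i + 1) lvi'
      else modifyRowLoop words (i + 1) lvi'
    else modifyRowLoop words (i + 1) last_valid_index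
  else last_valid_index
termination_by words.length - i

def modify_row (row : String) (section_names : List String) : String :=
  let words := PySem.Str.split₀ row
  let section_indices := is_section_name_in_row words section_names
  let last_valid_index := modifyRowLoop words 0 (-1)
  if last_valid_index ≠ -1 then
    if section_indices ≠ [] then
      let first_section_index := ((PySem.List.min? section_indices (fun x => x.1)).getD (0, 0)).1
      PySem.Str.join " " (PySem.List.slice words none (some (last_valid_index + 1)) ++
        PySem.List.slice words (some first_section_index) none)
    else
      PySem.Str.join " " (PySem.List.slice words none (some (last_valid_index + 1)))
  else row

-- ===== PORT B =====
-- 'words[i:i + len(p)] == p' for a pre-split pattern p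
def matchPat (words : List String) (i : Nat) (p : List String) : Bool :=
  decide (PySem.List.slice words (some (i : Int)) (some ((i : Int) + (p.length : Int))) = p)

-- 'i + 1 < n and words[i+1] not in VOO_info_codes and words[i+1] not in VOO_info_codes.values()'
def badNext (words : List String) (i : Nat) : Bool :=
  decide (i + 1 < words.length) &&
  !(vooDict.contains (words.getD (i + 1) "")) &&
  !((vooDict.values).contains (words.getD (i + 1) ""))

-- B's fused 'for i in range(n)' loop: state (last_valid, stopped, first_section), early break
def fusedScan (words : List String) (patterns : List (List String)) (i : Nat)
    (lvi : Int) (stopped : Bool) (fsec : Option Int) : Int × Option Int :=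
  if h : i < words.length then
    let fsec' := if fsec.isNone && patterns.any (matchPat words i) then some (i : Int) else fsec
    let st :=
      if !stopped && vooDict.contains words[i] then ((i : Int), badNext words i)
      else (lvi, stopped)
    if st.2 && fsec'.isSome then (st.1, fsec')
    else fusedScan words patterns (i + 1) st.1 st.2 fsec'
  else (lvi, fsec)
termination_by words.length - i

def modify_row_alt (row : String) (section_names : List String) : String :=
  let words := PySem.Str.split₀ row
  let patterns := section_names.map PySem.Str.split₀
  let r := fusedScan words patterns 0 (-1) false none
  if r.1 = -1 then row
  else
    match r.2 with
    | none => PySem.Str.join " " (PySem.List.slice words none (some (r.1 + 1)))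
    | some f => PySem.Str.join " " (PySem.List.slice words none (some (r.1 + 1)) ++
        PySem.List.slice words (some f) none)

-- ===== PRECONDITION & SPEC =====
def Spec_modify_row (row : String) (section_names : List String) (out : String) : Prop := out = modify_row_alt row section_names
instance (row : String) (section_names : List String) (out : String) : Decidable (Spec_modify_row row section_names out) := by unfold Spec_modify_row; infer_instance

-- ===== CLAIM (what is proved, stated in full; the proofs are below) =====
def Claim_equal_modify_row : Prop := ∀ (row : String) (section_names : List String), Dom_modify_row row section_names → Spec_modify_row row section_names (modify_row row section_names)

-- ===== LEMMAS AND PROOFS =====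

-- 'word in VOO_info_codes … matchAt' as A sees it
def matchAt (words section_names : List String) (i : Nat) : Bool :=
  section_names.any (secMatch words (i : Int))

-- the first word index ≥ i at which some pattern matches
def firstFrom (words : List String) (patterns : List (List String)) (i : Nat) : Option Int :=
  if h : i < words.length then
    if patterns.any (matchPat words i) then some (i : Int)
    else firstFrom words patterns (i + 1)
  else none
termination_by words.length - i

theorem any_map_patterns (words : List String) (sns : List String) (i : Nat) :
    (sns.map PySem.Str.split₀).any (matchPat words i) = matchAt words sns i := by
  rw [List.any_map]; rfl

-- one unfolding of A's loop, with the next-word test packaged as badNext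
theorem loop_unfold (words : List String) (i : Nat) (lvi : Int) (h : i < words.length) :
    modifyRowLoop words i lvi =
      if vooDict.contains words[i] then
        (if badNext words i then (i : Int) else modifyRowLoop words (i + 1) (i : Int))
      else modifyRowLoop words (i + 1) lvi := by
  rw [modifyRowLoop]
  simp only [dif_pos h]
  by_cases hc : vooDict.contains words[i]
  · simp only [if_pos hc]
    by_cases h2 : i + 1 < words.length
    · have hg : words.getD (i + 1) "" = words[i + 1] := by
        rw [List.getD_eq_getElem?_getD, List.getElem?_eq_getElem h2]; rfl
      simp only [badNext, hg, decide_eq_true h2, Bool.true_and]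
      simp [h2]
    · simp [badNext, h2]
  · simp [hc]

-- the fused-scan invariant: its first component is A's (possibly frozen) loop value,
-- its second the first match position at or after i (unless already fixed)
theorem fused_eq (words : List String) (patterns : List (List String)) :
    ∀ (n i : Nat) (lvi : Int) (stopped : Bool) (fsec : Option Int), words.length ≤ i + n →
    fusedScan words patterns i lvi stopped fsec =
      ((if stopped then lvi else modifyRowLoop words i lvi),
       match fsec with
       | some j => some j
       | none => firstFrom words patterns i) := by
  intro n
  induction n with
  | zero =>
    intro i lvi stopped fsec h
    have hi : ¬ i < words.length := by omega
    rw [fusedScan, firstFrom, modifyRowLoop]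
    simp only [dif_neg hi]
    cases fsec <;> cases stopped <;> simp
  | succ n ih =>
    intro i lvi stopped fsec h
    by_cases hi : i < words.length
    · rw [fusedScan]
      simp only [dif_pos hi]
      have hff : firstFrom words patterns i =
          if patterns.any (matchPat words i) then some (i : Int)
          else firstFrom words patterns (i + 1) := by
        rw [firstFrom]; simp [hi]
      cases fsec with
      | some j =>
        simp only [Option.isNone_some, Bool.false_and, Bool.false_eq_true, if_false]
        cases stopped with
        | true =>
          simp only [Bool.not_true, Bool.false_and, Option.isSome_some, Bool.true_and,
            Bool.false_eq_true, if_false]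
          simp
        | false =>
          simp only [Bool.not_false, Bool.true_and]
          by_cases hc : vooDict.contains words[i]
          · simp only [if_pos hc]
            by_cases hb : badNext words i = true
            · simp [hb, loop_unfold words i lvi hi, hc]
            · simp only [Bool.not_eq_true] at hb
              simp only [hb, Bool.false_and, Bool.false_eq_true, if_false]
              rw [ih (i + 1) (i : Int) false (some j) (by omega)]
              simp [loop_unfold words i lvi hi, hc, hb]
          · simp only [if_neg hc, Bool.false_and, Bool.false_eq_true, if_false]
            rw [ih (i + 1) lvi false (some j) (by omega)]
            simp [loop_unfold words i lvi hi, hc]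
      | none =>
        simp only [Option.isNone_none, Bool.true_and]
        by_cases hP : patterns.any (matchPat words i) = true
        · simp only [hP, if_true]
          cases stopped with
          | true =>
            simp only [Bool.not_true, Bool.false_and, Option.isSome_some, Bool.true_and,
              Bool.false_eq_true, if_false]
            simp [hff, hP]
          | false =>
            simp only [Bool.not_false, Bool.true_and]
            by_cases hc : vooDict.contains words[i]
            · simp only [if_pos hc]
              by_cases hb : badNext words i = true
              · simp [hb, loop_unfold words i lvi hi, hc, hff, hP]
              · simp only [Bool.not_eq_true] at hb
                simp only [hb, Bool.false_and, Bool.false_eq_true, if_false]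
                rw [ih (i + 1) (i : Int) false (some (i : Int)) (by omega)]
                simp [loop_unfold words i lvi hi, hc, hb, hff, hP]
            · simp only [if_neg hc, Bool.false_and, Bool.false_eq_true, if_false]
              rw [ih (i + 1) lvi false (some (i : Int)) (by omega)]
              simp [loop_unfold words i lvi hi, hc, hff, hP]
        · simp only [Bool.not_eq_true] at hP
          simp only [hP, Bool.false_eq_true, if_false]
          cases stopped with
          | true =>
            simp only [Bool.not_true, Bool.false_and, Option.isSome_none,
              Bool.and_false, Bool.false_eq_true, if_false]
            rw [ih (i + 1) lvi true none (by omega)]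
            simp [hff, hP]
          | false =>
            simp only [Bool.not_false, Bool.true_and]
            by_cases hc : vooDict.contains words[i]
            · simp only [if_pos hc]
              by_cases hb : badNext words i = true
              · simp only [hb, Option.isSome_none, Bool.and_false, Bool.false_eq_true, if_false]
                rw [ih (i + 1) (i : Int) true none (by omega)]
                simp [loop_unfold words i lvi hi, hc, hb, hff, hP]
              · simp only [Bool.not_eq_true] at hb
                simp only [hb, Bool.false_and, Bool.false_eq_true, if_false]
                rw [ih (i + 1) (i : Int) false none (by omega)]
                simp [loop_unfold words i lvi hi, hc, hb, hff, hP]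
            · simp only [if_neg hc, Bool.false_and, Bool.false_eq_true, if_false]
              rw [ih (i + 1) lvi false none (by omega)]
              simp [loop_unfold words i lvi hi, hc, hff, hP]
    · rw [fusedScan, firstFrom, modifyRowLoop]
      simp only [dif_neg hi]
      cases fsec <;> cases stopped <;> simp

-- characterization of A's section_indices list
theorem si_eq (words section_names : List String) :
    is_section_name_in_row words section_names =
      (PySem.List.pyRange 0 (words.length : Int) 1).flatMap (fun i =>
        (section_names.filter (secMatch words i)).map
          (fun s => (i, i + ((PySem.Str.split₀ s).length : Int) - 1))) := by
  unfold is_section_name_in_row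
  rw [show (fun (acc : List (Int × Int)) (i : Int) =>
        section_names.foldl (fun acc2 sec =>
          if secMatch words i sec then
            acc2 ++ [(i, i + ((PySem.Str.split₀ sec).length : Int) - 1)]
          else acc2) acc)
      = (fun (acc : List (Int × Int)) (i : Int) =>
          acc ++ (section_names.filter (secMatch words i)).map
            (fun s => (i, i + ((PySem.Str.split₀ s).length : Int) - 1)))
    from funext fun acc => funext fun i => PySem.List.foldl_append_if (p := secMatch words i)
      (f := fun s => (i, i + ((PySem.Str.split₀ s).length : Int) - 1)) section_names acc]
  rw [PySem.List.foldl_append_eq_flatMap]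
  simp

theorem si_mem (words section_names : List String) (p : Int × Int)
    (hp : p ∈ is_section_name_in_row words section_names) :
    ∃ k : Nat, k < words.length ∧ matchAt words section_names k = true ∧ p.1 = (k : Int) := by
  rw [si_eq] at hp
  rcases List.mem_flatMap.1 hp with ⟨i, hi, hp2⟩
  rw [PySem.List.mem_pyRange_one] at hi
  rcases List.mem_map.1 hp2 with ⟨s, hs, rfl⟩
  rcases List.mem_filter.1 hs with ⟨hsmem, hsm⟩
  refine ⟨i.toNat, by omega, ?_, by simp; omega⟩
  have : ((i.toNat : Nat) : Int) = i := by omega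
  simp only [matchAt, this]
  exact List.any_eq_true.2 ⟨s, hsmem, hsm⟩

theorem si_mem_of_match (words section_names : List String) (k : Nat)
    (hk : k < words.length) (hm : matchAt words section_names k = true) :
    ∃ p ∈ is_section_name_in_row words section_names, p.1 = (k : Int) := by
  rcases List.any_eq_true.1 hm with ⟨s, hsmem, hsm⟩
  refine ⟨((k : Int), (k : Int) + ((PySem.Str.split₀ s).length : Int) - 1), ?_, rfl⟩
  rw [si_eq]
  refine List.mem_flatMap.2 ⟨(k : Int), PySem.List.mem_pyRange_one.2 ⟨by omega, by omega⟩, ?_⟩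
  exact List.mem_map.2 ⟨s, List.mem_filter.2 ⟨hsmem, hsm⟩, rfl⟩

theorem fs_spec (words section_names : List String) : ∀ (n i : Nat), words.length ≤ i + n →
    (firstFrom words (section_names.map PySem.Str.split₀) i = none ↔
      ∀ k, i ≤ k → k < words.length → matchAt words section_names k = false) ∧
    (∀ j, firstFrom words (section_names.map PySem.Str.split₀) i = some j →
      ∃ jn : Nat, j = (jn : Int) ∧ i ≤ jn ∧ jn < words.length ∧
        matchAt words section_names jn = true ∧
        ∀ k, i ≤ k → k < jn → matchAt words section_names k = false) := by
  intro n
  induction n with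
  | zero =>
    intro i h
    rw [firstFrom]
    simp [show ¬ i < words.length by omega]
    intro k hk1 hk2; omega
  | succ n ih =>
    intro i h
    by_cases hi : i < words.length
    · rw [firstFrom]
      rw [any_map_patterns]
      by_cases hm : matchAt words section_names i
      · simp only [dif_pos hi, if_pos hm]
        constructor
        · constructor
          · intro hcon; exact absurd hcon (by simp)
          · intro hall; exact absurd hm (by simp [hall i le_rfl hi])
        · intro j hj
          refine ⟨i, by simpa using hj.symm, le_rfl, hi, hm, ?_⟩
          intro k hk1 hk2; omega
      · simp only [dif_pos hi, if_neg hm]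
        rcases ih (i + 1) (by omega) with ⟨ihn, ihs⟩
        constructor
        · rw [ihn]
          constructor
          · intro hall k hk1 hk2
            rcases Nat.eq_or_lt_of_le hk1 with rfl | hlt
            · simpa using hm
            · exact hall k hlt hk2
          · intro hall k hk1 hk2; exact hall k (by omega) hk2
        · intro j hj
          rcases ihs j hj with ⟨jn, rfl, hjn1, hjn2, hjn3, hjn4⟩
          refine ⟨jn, rfl, by omega, hjn2, hjn3, ?_⟩
          intro k hk1 hk2
          rcases Nat.eq_or_lt_of_le hk1 with rfl | hlt
          · simpa using hm
          · exact hjn4 k hlt hk2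
    · rw [firstFrom]
      simp [show ¬ i < words.length by omega]
      intro k hk1 hk2; omega

-- the section decision and chosen index agree
theorem section_agree (words section_names : List String) :
    (is_section_name_in_row words section_names = [] ↔
      firstFrom words (section_names.map PySem.Str.split₀) 0 = none) ∧
    (∀ j, firstFrom words (section_names.map PySem.Str.split₀) 0 = some j →
      ((PySem.List.min? (is_section_name_in_row words section_names) (fun x => x.1)).getD (0, 0)).1 = j) := by
  rcases fs_spec words section_names words.length 0 (by omega) with ⟨hn, hs⟩
  constructor
  · constructor
    · intro hnil
      rw [hn]
      intro k _ hk2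
      by_contra hcon
      rcases si_mem_of_match words section_names k hk2 (by simpa using hcon) with ⟨p, hp, _⟩
      rw [hnil] at hp; exact absurd hp (List.not_mem_nil)
    · intro hnone
      by_contra hne
      rcases List.exists_mem_of_ne_nil _ hne with ⟨p, hp⟩
      rcases si_mem words section_names p hp with ⟨k, hk1, hk2, _⟩
      exact absurd hk2 (by simp [hn.1 hnone k (by omega) hk1])
  · intro j hj
    rcases hs j hj with ⟨jn, rfl, _, hjn2, hjn3, hjn4⟩
    rcases si_mem_of_match words section_names jn hjn2 hjn3 with ⟨q, hq, hq1⟩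
    have hne : is_section_name_in_row words section_names ≠ [] := by
      intro hnil; rw [hnil] at hq; exact absurd hq (List.not_mem_nil)
    cases hmin : PySem.List.min? (is_section_name_in_row words section_names) (fun x => x.1) with
    | none => exact absurd ((PySem.List.min?_eq_none_iff _ _).1 hmin) hne
    | some m =>
      have hm_mem := PySem.List.min?_mem hmin
      have hm_min := PySem.List.min?_isMin hmin
      rcases si_mem words section_names m hm_mem with ⟨km, hkm1, hkm2, hkm3⟩
      have h1 : m.1 ≤ (jn : Int) := by rw [← hq1]; exact hm_min q hq
      have h2 : (jn : Int) ≤ m.1 := by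
        rw [hkm3]
        by_contra hcon
        have : km < jn := by omega
        exact absurd hkm2 (by simp [hjn4 km (by omega) this])
      simp only [Option.getD_some]
      omega

theorem ports_agree (row : String) (sns : List String) :
    modify_row row sns = modify_row_alt row sns := by
  simp only [modify_row, modify_row_alt]
  set words := PySem.Str.split₀ row with hw
  have hfused := fused_eq words (sns.map PySem.Str.split₀) words.length 0 (-1) false none (by omega)
  simp only [if_neg (by simp : ¬ (false : Bool) = true)] at hfused
  rw [hfused]
  rcases section_agree words sns with ⟨hnil, hsome⟩
  by_cases hz : modifyRowLoop words 0 (-1) = -1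
  · simp [hz]
  · cases hfs : firstFrom words (sns.map PySem.Str.split₀) 0 with
    | none =>
      have hsinil : is_section_name_in_row words sns = [] := hnil.2 hfs
      simp [hz, hsinil]
    | some j =>
      have hsine : is_section_name_in_row words sns ≠ [] := by
        intro hcon
        rw [hnil.1 hcon] at hfs
        simp at hfs
      have hmin := hsome j hfs
      simp [hz, hsine, hmin]

-- ===== VERDICT (by name: the statement is the Claim_ definition above) =====
theorem modify_row_spec : Claim_equal_modify_row := by
  intro row section_names _
  unfold Spec_modify_row
  exact ports_agree row section_names
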